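-- pv_equiv track=rewrite | github.com/pypi-data/pypi-mirror-403 | packages/logsage/logsage-0.1.5-py3-none-any.whl/logsage/auto_resume_policy/utils.py | split_tuples_by_index_groups
-- ===== SOURCE A (Python) =====
-- from collections import Counter, defaultdict, deque
-- from typing import List
-- from typing import Any, Tuple
--
-- def split_tuples_by_index_groups(
--     index_groups: List[List[int]], items: List[Tuple[Any, Any, int]]
-- ) -> List[List[Tuple[Any, Any, int]]]:
--     """Split tuples into groups based on predefined index groups.
--
--     Parameters
--     ----------
--     index_groups : list of lists
--         Each inner list contains indices belonging to one group
--     items : list of tuples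
--         (error, error_pattern, index)
--
--     Returns:
--     -------
--     list of lists
--         Tuples grouped according to index_groups
--     """
--     # Build index -> tuples map
--     index_to_items = defaultdict(list)
--     for item in items:
--         index_to_items[item[2]].append(item)
--
--     # Build result aligned with index_groups
--     result = []
--     for group in index_groups:
--         grouped_items = []
--         for idx in group:
--             grouped_items.extend(index_to_items.get(idx, []))
--         result.append(grouped_items)
--
--     return result
-- ===== SOURCE B (Python) =====
-- from typing import Any, List, Tuple
--
-- def split_tuples_by_index_groups(
--     index_groups: List[List[int]], items: List[Tuple[Any, Any, int]]
-- ) -> List[List[Tuple[Any, Any, int]]]: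
--     # No dict: for each group, rescan items once per index and keep matches.
--     result = []
--     for group in index_groups:
--         grouped_items = []
--         for idx in group:
--             for item in items:
--                 if item[2] == idx:
--                     grouped_items.append(item)
--         result.append(grouped_items)
--     return result
-- ===== Notes on version B (the rewrite author's own statement) =====
-- stated objective: simpler
-- what changed: Drops the defaultdict index->items map entirely; each group index directly rescans the items list and appends the matching tuples, preserving group order and original item order.
import Mathlib
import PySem

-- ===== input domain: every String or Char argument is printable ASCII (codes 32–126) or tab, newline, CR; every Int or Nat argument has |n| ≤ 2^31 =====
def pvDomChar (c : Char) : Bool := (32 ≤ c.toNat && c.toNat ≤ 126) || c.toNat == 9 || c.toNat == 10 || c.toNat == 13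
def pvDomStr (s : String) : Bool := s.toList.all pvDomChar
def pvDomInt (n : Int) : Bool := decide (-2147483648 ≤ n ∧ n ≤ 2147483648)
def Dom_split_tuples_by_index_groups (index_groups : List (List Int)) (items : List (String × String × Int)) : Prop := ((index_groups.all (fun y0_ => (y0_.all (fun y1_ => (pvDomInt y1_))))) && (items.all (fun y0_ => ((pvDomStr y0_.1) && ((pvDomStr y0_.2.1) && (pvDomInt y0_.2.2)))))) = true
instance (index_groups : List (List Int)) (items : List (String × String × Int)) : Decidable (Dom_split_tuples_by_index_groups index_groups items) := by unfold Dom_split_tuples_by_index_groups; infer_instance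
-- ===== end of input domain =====

-- B drops A's defaultdict index->items map: each group index rescans the items list directly. Objective: simpler.

-- ===== PORT A =====
-- index_to_items = defaultdict(list); for item in items: index_to_items[item[2]].append(item)
-- result = []; for group in index_groups: grouped = []; for idx in group: grouped.extend(map.get(idx, [])); result.append(grouped)
def split_tuples_by_index_groups (index_groups : List (List Int)) (items : List (String × String × Int)) : List (List (String × String × Int)) :=
  let index_to_items : PySem.Dict Int (List (String × String × Int)) :=
    items.foldl (fun d item => d.modify item.2.2 [] (· ++ [item])) PySem.Dict.empty
  index_groups.foldl
    (fun result group =>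
      result ++ [group.foldl (fun grouped idx => grouped ++ index_to_items.getD idx []) []])
    []

-- ===== PORT B =====
-- for group in index_groups: grouped = []; for idx in group: for item in items: if item[2]==idx: grouped.append(item); result.append(grouped)
def split_tuples_by_index_groups_alt (index_groups : List (List Int)) (items : List (String × String × Int)) : List (List (String × String × Int)) :=
  index_groups.foldl
    (fun result group =>
      result ++ [group.foldl
        (fun grouped idx =>
          items.foldl (fun g item => if item.2.2 == idx then g ++ [item] else g) grouped)
        []])
    []

-- ===== PRECONDITION & SPEC =====
def Spec_split_tuples_by_index_groups (index_groups : List (List Int)) (items : List (String × String × Int)) (out : List (List (String × String × Int))) : Prop := out = split_tuples_by_index_groups_alt index_groups items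
instance (index_groups : List (List Int)) (items : List (String × String × Int)) (out : List (List (String × String × Int))) : Decidable (Spec_split_tuples_by_index_groups index_groups items out) := by unfold Spec_split_tuples_by_index_groups; infer_instance

-- ===== CLAIM (what is proved, stated in full; the proofs are below) =====
def Claim_equal_split_tuples_by_index_groups : Prop := ∀ (index_groups : List (List Int)) (items : List (String × String × Int)), Dom_split_tuples_by_index_groups index_groups items → Spec_split_tuples_by_index_groups index_groups items (split_tuples_by_index_groups index_groups items)

-- ===== LEMMAS AND PROOFS =====

-- A's dict lookup at idx is exactly the filter of items by third component.
theorem getD_build_map (items : List (String × String × Int)) (idx : Int) :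
    (items.foldl (fun d item => d.modify item.2.2 [] (· ++ [item]))
        (PySem.Dict.empty : PySem.Dict Int (List (String × String × Int)))).getD idx []
      = items.filter (fun item => item.2.2 == idx) := by
  have h := PySem.Dict.getD_foldl_modify_append
      (l := items.map (fun item => (item.2.2, item)))
      (d := (PySem.Dict.empty : PySem.Dict Int (List (String × String × Int)))) (c := idx)
  rw [List.foldl_map, List.filter_map, List.map_map] at h
  simpa [Function.comp_def] using h

-- B's inner items-scan appends the same filter.
theorem inner_scan (items : List (String × String × Int)) (idx : Int)
    (g : List (String × String × Int)) :
    items.foldl (fun g item => if item.2.2 == idx then g ++ [item] else g) g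
      = g ++ items.filter (fun item => item.2.2 == idx) := by
  induction items generalizing g with
  | nil => simp
  | cons x xs ih =>
    simp only [List.foldl_cons, List.filter_cons, beq_iff_eq] at ih ⊢
    by_cases h : x.2.2 = idx
    · simp [h, ih, List.append_assoc]
    · simp [h, ih]

-- ===== VERDICT (by name: the statement is the Claim_ definition above) =====
theorem split_tuples_by_index_groups_spec : Claim_equal_split_tuples_by_index_groups := by
  intro index_groups items _
  unfold Spec_split_tuples_by_index_groups split_tuples_by_index_groups split_tuples_by_index_groups_alt
  have hinner :
      (fun (grouped : List (String × String × Int)) (idx : Int) =>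
          grouped ++ (items.foldl (fun d item => d.modify item.2.2 [] (· ++ [item]))
            (PySem.Dict.empty : PySem.Dict Int (List (String × String × Int)))).getD idx [])
        = (fun grouped idx =>
            items.foldl (fun g item => if item.2.2 == idx then g ++ [item] else g) grouped) := by
    funext grouped idx
    rw [inner_scan, getD_build_map]
  have houter :
      (fun (result : List (List (String × String × Int))) (group : List Int) =>
          result ++ [group.foldl
            (fun grouped idx =>
              grouped ++ (items.foldl (fun d item => d.modify item.2.2 [] (· ++ [item]))
                (PySem.Dict.empty : PySem.Dict Int (List (String × String × Int)))).getD idx []) []])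
        = (fun result group =>
            result ++ [group.foldl
              (fun grouped idx =>
                items.foldl (fun g item => if item.2.2 == idx then g ++ [item] else g) grouped) []]) := by
    funext result group
    rw [hinner]
  exact congrArg (fun f => List.foldl f [] index_groups) houter
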